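-- pv_equiv track=rewrite | github.com/DKarandikar/aoc2023 | src/day14.py | roll_left
-- ===== SOURCE A (Python) =====
-- def roll_left(row: str) -> str:
--     groups = []
--     current_group = [0, 0]
--     for char in row:
--         if char == 'O':
--             current_group[0] += 1
--         elif char == '.':
--             current_group[1] += 1
--         else:
--             groups.append(current_group)
--             current_group = [0, 0]
--
--     groups.append(current_group)
--
--     rv = ""
--     for group in groups:
--         rv += "O" * group[0]
--         rv += "." * group[1]
--         rv += '#'
--
--     return rv[:-1]  # Trim final unnecessary #
-- ===== SOURCE B (Python) =====
-- def roll_left(row: str) -> str: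
--     # Write-pointer approach: pre-fill a buffer of dots, walk the row once,
--     # dropping each 'O' at the current write pointer and planting a '#' (and
--     # resetting the pointer) at every wall position.
--     out = ['.'] * len(row)
--     target = 0
--     for i, ch in enumerate(row):
--         if ch == 'O':
--             out[target] = 'O'
--             target += 1
--         elif ch != '.':
--             out[i] = '#'
--             target = i + 1
--     return ''.join(out)
-- ===== Notes on version B (the rewrite author's own statement) =====
-- stated objective: alternative
-- what changed: A builds a list of (rock-count, gap-count) group pairs in one pass and then renders the groups with separator characters, trimming a trailing separator; B never forms groups: it pre-fills a gap-character buffer of the row's length and in a single pass drops each rock at a moving write pointer and plants a wall at each wall position, so no counting, rendering or trimming step exists.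
import Mathlib
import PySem

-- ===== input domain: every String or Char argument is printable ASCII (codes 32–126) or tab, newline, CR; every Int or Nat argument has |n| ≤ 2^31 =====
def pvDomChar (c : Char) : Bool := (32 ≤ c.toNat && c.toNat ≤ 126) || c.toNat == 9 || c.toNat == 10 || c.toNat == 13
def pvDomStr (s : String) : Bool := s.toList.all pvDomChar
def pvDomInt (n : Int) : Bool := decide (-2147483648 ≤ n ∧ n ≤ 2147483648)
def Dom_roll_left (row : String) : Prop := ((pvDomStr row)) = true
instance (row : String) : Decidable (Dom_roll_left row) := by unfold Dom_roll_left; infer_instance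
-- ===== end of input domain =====

-- B replaces A's group-counting pass plus rendering/trimming by a single pass that writes
-- 'O's at a moving write pointer into a pre-filled dot buffer (objective: alternative; a timing run measured B faster by a constant factor).

-- ===== PORT A =====
-- one loop step of A: update (groups, current_group) for one character
def rollStep (st : List (Nat × Nat) × (Nat × Nat)) (c : Char) : List (Nat × Nat) × (Nat × Nat) :=
  if c = 'O' then (st.1, (st.2.1 + 1, st.2.2))
  else if c = '.' then (st.1, (st.2.1, st.2.2 + 1))
  else (st.1 ++ [st.2], (0, 0))

-- "O" * group[0] + "." * group[1] + '#'
def rendGroup (g : Nat × Nat) : List Char :=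
  List.replicate g.1 'O' ++ List.replicate g.2 '.' ++ ['#']

def roll_left (row : String) : String :=
  let st := row.toList.foldl rollStep ([], (0, 0))
  let groups := st.1 ++ [st.2]
  -- second loop: rv += "O"*g[0]; rv += "."*g[1]; rv += '#'
  let rv := groups.foldl (fun acc g => acc ++ rendGroup g) []
  String.ofList rv.dropLast          -- rv[:-1]

-- ===== PORT B =====
-- one loop step of B: state (out, target); indices written are always in range
-- (0 ≤ target ≤ i < len(row)), so List.set is exact for Python's item assignment here
def altStep (st : List Char × Int) (ic : Int × Char) : List Char × Int :=
  if ic.2 = 'O' then (st.1.set st.2.toNat 'O', st.2 + 1)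
  else if ic.2 = '.' then st
  else (st.1.set ic.1.toNat '#', ic.1 + 1)

def roll_left_alt (row : String) : String :=
  let st := (PySem.List.enumerate row.toList).foldl altStep
              (List.replicate row.toList.length '.', 0)
  String.ofList st.1

-- ===== PRECONDITION & SPEC =====
def Spec_roll_left (row : String) (out : String) : Prop := out = roll_left_alt row
instance (row : String) (out : String) : Decidable (Spec_roll_left row out) := by unfold Spec_roll_left; infer_instance

-- ===== CLAIM =====
def Claim_equal_roll_left : Prop := ∀ (row : String), Dom_roll_left row → Spec_roll_left row (roll_left row)

-- ===== LEMMAS AND PROOFS =====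

-- the rolled row, computed recursively with b pending dots of the current segment
def SRoll : List Char → Nat → List Char
  | [], b => List.replicate b '.'
  | c :: cs, b =>
    if c = 'O' then 'O' :: SRoll cs b
    else if c = '.' then SRoll cs (b + 1)
    else List.replicate b '.' ++ '#' :: SRoll cs 0

-- recursive restatement of A's first loop: the final groups list
def procA : List Char → Nat → Nat → List (Nat × Nat)
  | [], a, b => [(a, b)]
  | c :: cs, a, b =>
      if c = 'O' then procA cs (a + 1) b
      else if c = '.' then procA cs a (b + 1)
      else (a, b) :: procA cs 0 0

lemma foldl_rollStep (cs : List Char) : ∀ (gs : List (Nat × Nat)) (a b : Nat),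
    (cs.foldl rollStep (gs, (a, b))).1 ++ [(cs.foldl rollStep (gs, (a, b))).2]
      = gs ++ procA cs a b := by
  induction cs with
  | nil => intro gs a b; simp [procA]
  | cons c cs ih =>
    intro gs a b
    by_cases hO : c = 'O'
    · simp [rollStep, procA, hO, ih]
    · by_cases hD : c = '.'
      · simp [rollStep, procA, hD, ih]
      · simp [rollStep, procA, hO, hD, ih]

lemma foldl_rend (gs : List (Nat × Nat)) : ∀ (acc : List Char),
    gs.foldl (fun acc g => acc ++ rendGroup g) acc = acc ++ (gs.map rendGroup).flatten := by
  induction gs with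
  | nil => intro acc; simp
  | cons g gs ih => intro acc; simp [ih]

-- A's rendered groups are the rolled row followed by one '#'
lemma render_procA (cs : List Char) : ∀ (a b : Nat),
    ((procA cs a b).map rendGroup).flatten
      = List.replicate a 'O' ++ SRoll cs b ++ ['#'] := by
  induction cs with
  | nil => intro a b; simp [procA, rendGroup, SRoll]
  | cons c cs ih =>
    intro a b
    by_cases hO : c = 'O'
    · rw [show procA (c :: cs) a b = procA cs (a + 1) b by simp [procA, hO]]
      rw [ih, show SRoll (c :: cs) b = 'O' :: SRoll cs b by simp [SRoll, hO]]
      simp [List.replicate_succ']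
    · by_cases hD : c = '.'
      · rw [show procA (c :: cs) a b = procA cs a (b + 1) by simp [procA, hD]]
        rw [ih, show SRoll (c :: cs) b = SRoll cs (b + 1) by simp [SRoll, hD]]
      · rw [show procA (c :: cs) a b = (a, b) :: procA cs 0 0 by simp [procA, hO, hD]]
        rw [show SRoll (c :: cs) b = List.replicate b '.' ++ '#' :: SRoll cs 0 by
          simp [SRoll, hO, hD]]
        simp [rendGroup, ih]

lemma set_append_len (pre : List Char) (c x : Char) (rest : List Char) :
    (pre ++ c :: rest).set pre.length x = pre ++ x :: rest := by
  induction pre with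
  | nil => simp
  | cons p pre ih => simp [ih]

lemma altStep_O (out : List Char) (t i : Int) :
    altStep (out, t) (i, 'O') = (out.set t.toNat 'O', t + 1) := by simp [altStep]

lemma altStep_dot (out : List Char) (t i : Int) :
    altStep (out, t) (i, '.') = (out, t) := by simp [altStep]

lemma altStep_wall (out : List Char) (t i : Int) (c : Char) (hO : c ≠ 'O') (hD : c ≠ '.') :
    altStep (out, t) (i, c) = (out.set i.toNat '#', i + 1) := by simp [altStep, hO, hD]

-- B's fold invariant: with pre already written, b pending dots, the rest comes out rolled
lemma foldB_inv (cs : List Char) : ∀ (pre : List Char) (b : Nat),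
    ((PySem.List.enumerate cs ((pre.length + b : Nat) : Int)).foldl altStep
        (pre ++ List.replicate (b + cs.length) '.', (pre.length : Int))).1
      = pre ++ SRoll cs b := by
  induction cs with
  | nil => intro pre b; simp [PySem.List.enumerate_nil, SRoll]
  | cons c cs ih =>
    intro pre b
    rw [PySem.List.enumerate_cons, List.foldl_cons]
    by_cases hO : c = 'O'
    · subst hO
      rw [altStep_O, Int.toNat_natCast,
        show b + ('O' :: cs).length = (b + cs.length) + 1 from by simp; omega,
        List.replicate_succ, set_append_len,
        show pre ++ 'O' :: List.replicate (b + cs.length) '.'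
            = (pre ++ ['O']) ++ List.replicate (b + cs.length) '.' from by simp,
        show ((pre.length : Int)) + 1 = (((pre ++ ['O']).length : Nat) : Int) from by
          simp,
        show (((pre.length + b : Nat) : Int)) + 1 = (((pre ++ ['O']).length + b : Nat) : Int) from by
          push_cast; simp; omega,
        ih (pre ++ ['O']) b]
      simp [SRoll]
    · by_cases hD : c = '.'
      · subst hD
        rw [altStep_dot,
          show b + ('.' :: cs).length = (b + 1) + cs.length from by simp; omega,
          show (((pre.length + b : Nat) : Int)) + 1 = ((pre.length + (b + 1) : Nat) : Int) from by
            push_cast; ring,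
          ih pre (b + 1)]
        simp [SRoll]
      · rw [altStep_wall _ _ _ _ hO hD, Int.toNat_natCast,
          show b + (c :: cs).length = b + (cs.length + 1) from by simp,
          List.replicate_add, List.replicate_succ,
          show pre ++ (List.replicate b '.' ++ '.' :: List.replicate cs.length '.')
              = (pre ++ List.replicate b '.') ++ '.' :: List.replicate cs.length '.' from by simp,
          show pre.length + b = (pre ++ List.replicate b '.').length from by simp,
          set_append_len,
          show (pre ++ List.replicate b '.') ++ '#' :: List.replicate cs.length '.'
              = (pre ++ List.replicate b '.' ++ ['#']) ++ List.replicate cs.length '.' from by simp,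
          show (((pre ++ List.replicate b '.').length : Int)) + 1
              = (((pre ++ List.replicate b '.' ++ ['#']).length : Nat) : Int) from by
            simp; ring]
        have h := ih (pre ++ List.replicate b '.' ++ ['#']) 0
        simp only [Nat.add_zero, Nat.zero_add] at h
        rw [h]
        simp [SRoll, hO, hD]

-- ===== VERDICT =====
theorem roll_left_spec : Claim_equal_roll_left := by
  intro row _
  unfold Spec_roll_left roll_left roll_left_alt
  simp only []
  -- A side: groups → rendered → SRoll ++ ['#'], trimmed
  rw [foldl_rend, List.nil_append]
  have hgroups := foldl_rollStep row.toList [] 0 0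
  rw [show ((0 : Nat), (0 : Nat)) = ((0, 0) : Nat × Nat) from rfl] at hgroups ⊢
  rw [hgroups, List.nil_append, render_procA]
  simp only [List.replicate_zero, List.nil_append, List.dropLast_concat]
  -- B side: fold invariant with pre = [], b = 0
  have hB := foldB_inv row.toList [] 0
  simp only [List.length_nil, Nat.add_zero, Nat.cast_zero, List.nil_append,
    Nat.zero_add] at hB
  rw [hB]
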